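-- pv_equiv track=rewrite | github.com/Ferraz-milena06/mapeamento | mapeamento_comentado.py | mru
-- ===== SOURCE A (Python) =====
-- def mru(paginas, quantidade_quadros):
--     quadros = []
--     recentes = {}  # igual no LRU, mas aqui a lógica é o contrário
--     faltas = 0
--
--     for indice, pagina in enumerate(paginas):
--         if pagina in quadros:
--             # se já tá na memória, atualiza o “último uso”
--             recentes[pagina] = indice
--         else:
--             faltas += 1
--             if len(quadros) < quantidade_quadros:
--                 # ainda tem espaço, só adiciona
--                 quadros.append(pagina)
--                 recentes[pagina] = indice
--             else:
--                 # agora tiramos a mais recentemente usada (MRU)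
--                 pagina_mru = max(recentes, key=recentes.get)
--                 quadros[quadros.index(pagina_mru)] = pagina
--                 del recentes[pagina_mru]
--                 recentes[pagina] = indice
--     return list(quadros), faltas
-- ===== SOURCE B (Python) =====
-- def mru(paginas, quantidade_quadros):
--     # No dicts: the MRU victim is always the frame of the previously accessed
--     # page, so the single frame index 'ultimo' replaces A's 'recentes'
--     # timestamp dict, its max-scan and the quadros.index re-scan.
--     quadros = []
--     faltas = 0
--     ultimo = -1  # frame index of the most recently used page
--     for pagina in paginas:
--         try:
--             ultimo = quadros.index(pagina)
--         except ValueError: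
--             faltas += 1
--             if len(quadros) < quantidade_quadros:
--                 ultimo = len(quadros)
--                 quadros.append(pagina)
--             else:
--                 quadros[ultimo] = pagina
--     return quadros, faltas
-- ===== Notes on version B (the rewrite author's own statement) =====
-- stated objective: simpler
-- what changed: B drops both dicts entirely: it keeps only 'ultimo', the frame index of the most recently used page (which is always the MRU victim), so a fault overwrites quadros[ultimo] directly instead of max-scanning the 'recentes' timestamp dict and re-finding the frame with quadros.index.
import Mathlib
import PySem

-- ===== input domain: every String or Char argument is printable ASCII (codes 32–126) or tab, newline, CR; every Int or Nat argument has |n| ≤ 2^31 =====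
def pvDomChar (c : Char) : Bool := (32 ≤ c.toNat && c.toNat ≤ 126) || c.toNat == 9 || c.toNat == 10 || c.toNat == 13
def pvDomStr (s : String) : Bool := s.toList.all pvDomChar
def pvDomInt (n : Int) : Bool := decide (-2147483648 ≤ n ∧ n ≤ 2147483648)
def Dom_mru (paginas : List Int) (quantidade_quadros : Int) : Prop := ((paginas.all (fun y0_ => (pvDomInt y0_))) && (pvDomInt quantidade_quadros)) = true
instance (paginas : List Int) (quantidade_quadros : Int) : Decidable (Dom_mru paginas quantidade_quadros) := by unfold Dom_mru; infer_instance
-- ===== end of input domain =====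

-- B keeps no dict at all: the single frame index 'ultimo' of the most recently used page
-- replaces A's timestamp dict, its max-scan and quadros.index.

-- ===== PORT A =====
-- one iteration of A's loop: state = (quadros, recentes, faltas), element = (indice, pagina)
def mruStepA (k : Int) (s : List Int × PySem.Dict Int Int × Int) (ip : Int × Int) :
    List Int × PySem.Dict Int Int × Int :=
  let q := s.1; let rc := s.2.1; let f := s.2.2
  let indice := ip.1; let pagina := ip.2
  if pagina ∈ q then
    (q, rc.insert pagina indice, f)
  else if (q.length : Int) < k then
    (q ++ [pagina], rc.insert pagina indice, f + 1)
  else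
    -- pagina_mru = max(recentes, key=recentes.get); quadros[quadros.index(pagina_mru)] = pagina
    let paginaMru := (PySem.List.max? rc.keys (fun x => rc.getD x 0)).getD 0
    let i := (PySem.List.index? q paginaMru).getD 0
    (q.set i pagina, (rc.erase paginaMru).insert pagina indice, f + 1)

def mru (paginas : List Int) (quantidade_quadros : Int) : List Int × Int :=
  let s := (PySem.List.enumerate paginas 0).foldl (mruStepA quantidade_quadros)
    ([], PySem.Dict.empty, 0)
  (s.1, s.2.2)

-- ===== PORT B =====
-- Source B's for-loop as structural recursion over paginas; state (quadros, ultimo, faltas).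
-- try: ultimo = quadros.index(pagina) / except ValueError  =  match on index?.
def mruGoB (k : Int) : List Int → List Int → Int → Int → List Int × Int
  | [], quadros, _, faltas => (quadros, faltas)
  | pagina :: rest, quadros, ultimo, faltas =>
    match PySem.List.index? quadros pagina with
    | some i => mruGoB k rest quadros (i : Int) faltas
    | none =>
      if (quadros.length : Int) < k then
        mruGoB k rest (quadros ++ [pagina]) (quadros.length : Int) (faltas + 1)
      else
        -- quadros[ultimo] = pagina  (a negative Python index would wrap once)
        let j := if ultimo < 0 then ultimo + (quadros.length : Int) else ultimo
        mruGoB k rest (quadros.set j.toNat pagina) ultimo (faltas + 1)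

def mru_alt (paginas : List Int) (quantidade_quadros : Int) : List Int × Int :=
  mruGoB quantidade_quadros paginas [] (-1) 0

-- ===== PRECONDITION & SPEC =====
-- Pre_ excludes exactly the inputs where A raises: with a nonempty reference list and
-- quantidade_quadros < 1 the first fault reaches max() of the empty dict (ValueError);
-- B raises there too (IndexError).
def Pre_mru (paginas : List Int) (quantidade_quadros : Int) : Prop :=
  paginas = [] ∨ 1 ≤ quantidade_quadros
instance (paginas : List Int) (quantidade_quadros : Int) : Decidable (Pre_mru paginas quantidade_quadros) := by unfold Pre_mru; infer_instance

def pvWitness_mru : List Int × Int := ([1, 2, 3, 2, 4, 1], 3)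

def Spec_mru (paginas : List Int) (quantidade_quadros : Int) (out : List Int × Int) : Prop := out = mru_alt paginas quantidade_quadros
instance (paginas : List Int) (quantidade_quadros : Int) (out : List Int × Int) : Decidable (Spec_mru paginas quantidade_quadros out) := by unfold Spec_mru; infer_instance

-- ===== CLAIM (what is proved, stated in full; the proofs are below) =====
def Claim_equal_mru : Prop := ∀ (paginas : List Int) (quantidade_quadros : Int), Dom_mru paginas quantidade_quadros → Pre_mru paginas quantidade_quadros → Spec_mru paginas quantidade_quadros (mru paginas quantidade_quadros)

-- ===== LEMMAS AND PROOFS =====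

-- Dict.erase at the level of get? (no erase lemma in the prelude)
theorem dict_get?_erase (d : PySem.Dict Int Int) (k x : Int) :
    (d.erase k).get? x = if x = k then none else d.get? x := by
  obtain ⟨items⟩ := d
  induction items with
  | nil => simp [PySem.Dict.erase, PySem.Dict.get?]
  | cons p t ih =>
    by_cases hxk : x = k
    · subst hxk
      by_cases hpk : p.1 = x <;>
        simp_all [PySem.Dict.erase, PySem.Dict.get?, beq_iff_eq]
    · by_cases hpk : p.1 = k <;> by_cases hpx : p.1 = x <;>
        simp_all [PySem.Dict.erase, PySem.Dict.get?, beq_iff_eq]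

theorem dict_getD_erase (d : PySem.Dict Int Int) (k x : Int) :
    (d.erase k).getD x 0 = if x = k then 0 else d.getD x 0 := by
  rw [PySem.Dict.getD_eq_get?_getD, dict_get?_erase]
  split_ifs <;> simp [PySem.Dict.getD_eq_get?_getD]

theorem dict_mem_keys_erase (d : PySem.Dict Int Int) (k x : Int) :
    x ∈ (d.erase k).keys ↔ x ∈ d.keys ∧ x ≠ k := by
  simp only [PySem.Dict.keys, PySem.Dict.erase, List.mem_map, List.mem_filter]
  constructor
  · rintro ⟨p, ⟨hp, hne⟩, rfl⟩
    simp only [Bool.not_eq_eq_eq_not, Bool.not_true, beq_eq_false_iff_ne] at hne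
    exact ⟨⟨p, hp, rfl⟩, hne⟩
  · rintro ⟨⟨p, hp, rfl⟩, hne⟩
    exact ⟨p, ⟨hp, by simpa using hne⟩, rfl⟩

-- index? after overwriting position i (which holds l) with a fresh element p
theorem index?_set (q : List Int) (i : Nat) (l p x : Int)
    (hnd : q.Nodup) (hi : PySem.List.index? q l = some i) (hp : p ∉ q) :
    PySem.List.index? (q.set i p) x =
      if x = p then some i else if x = l then none else PySem.List.index? q x := by
  induction q generalizing i with
  | nil => simp [PySem.List.index?, List.idxOf?] at hi
  | cons a t ih =>
    have hat : a ∉ t := (List.nodup_cons.1 hnd).1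
    have hpa : p ≠ a := fun h => hp (h ▸ List.mem_cons_self)
    have hpt : p ∉ t := fun h => hp (List.mem_cons_of_mem _ h)
    rcases Nat.eq_zero_or_pos i with hz | hpos
    · subst hz
      have hal : a = l := by
        by_contra hne
        rw [PySem.List.index?_cons_of_ne t hne] at hi
        rcases Option.map_eq_some_iff.1 hi with ⟨m, _, hm⟩
        omega
      subst hal
      simp only [List.set_cons_zero]
      by_cases hxp : x = p
      · subst hxp
        rw [PySem.List.index?_cons_self]; simp
      · rw [PySem.List.index?_cons_of_ne t (fun h => hxp h.symm)]
        by_cases hxa : x = a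
        · subst hxa
          simp [hxp, hat]
        · rw [PySem.List.index?_cons_of_ne t (fun h => hxa h.symm)]
          simp [hxp, hxa]
    · obtain ⟨j, rfl⟩ : ∃ j, i = j + 1 := ⟨i - 1, by omega⟩
      have hal : a ≠ l := by
        intro h; subst h; rw [PySem.List.index?_cons_self] at hi; simp at hi
      rw [PySem.List.index?_cons_of_ne t hal] at hi
      rcases Option.map_eq_some_iff.1 hi with ⟨m, hm, hmeq⟩
      have hmj : m = j := by omega
      subst hmj
      simp only [List.set_cons_succ]
      by_cases hxa : x = a
      · subst hxa
        have hxl : x ≠ l := hal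
        have hxp : x ≠ p := fun h => hpa h.symm
        rw [PySem.List.index?_cons_self x (t.set m p)]
        simp only [if_neg hxp, if_neg hxl]
        exact (PySem.List.index?_cons_self x t).symm
      · rw [PySem.List.index?_cons_of_ne _ (fun h => hxa h.symm),
          PySem.List.index?_cons_of_ne t (fun h => hxa h.symm),
          ih m (List.nodup_cons.1 hnd).2 hm hpt]
        split_ifs <;> simp

theorem mem_set_fresh (q : List Int) (i : Nat) (l p x : Int)
    (hnd : q.Nodup) (hi : PySem.List.index? q l = some i) (hp : p ∉ q) :
    x ∈ q.set i p ↔ x = p ∨ (x ∈ q ∧ x ≠ l) := by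
  have h1 := PySem.List.index?_eq_none_iff (q.set i p) x
  rw [index?_set q i l p x hnd hi hp] at h1
  by_cases hxp : x = p
  · subst hxp
    have hmemset : x ∈ q.set i x := by
      by_contra hc
      have := h1.2 hc
      simp at this
    simp [hmemset]
  · by_cases hxl : x = l
    · subst hxl
      simp only [if_neg hxp] at h1
      have hout : x ∉ q.set i p := h1.1 rfl
      exact iff_of_false hout (by rintro (h | ⟨_, h⟩); exact hxp h; exact h rfl)
    · simp only [if_neg hxp, if_neg hxl] at h1
      rw [PySem.List.index?_eq_none_iff] at h1
      have hiff : x ∈ q ↔ x ∈ q.set i p := not_iff_not.1 h1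
      constructor
      · intro hset; exact Or.inr ⟨hiff.2 hset, hxl⟩
      · rintro (h | ⟨hq, _⟩)
        · exact absurd h hxp
        · exact hiff.1 hq

-- max? returns the unique strict maximum
theorem max?_eq_of_strict (xs : List Int) (key : Int → Int) (l : Int)
    (hl : l ∈ xs) (hstrict : ∀ y ∈ xs, y ≠ l → key y < key l) :
    PySem.List.max? xs key = some l := by
  rcases hmax : PySem.List.max? xs key with _ | m
  · rw [PySem.List.max?_eq_none_iff] at hmax; subst hmax; cases hl
  · have hm := PySem.List.max?_mem hmax
    have hle := PySem.List.max?_isMax hmax l hl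
    by_cases hml : m = l
    · rw [hml]
    · exact absurd hle (not_le.2 (hstrict m hm hml))

-- the invariant tying A's state (q, rc, f) to B's frame index u after the
-- pages with indices < n have been processed
def MruInv (n : Int) (q : List Int) (rc : PySem.Dict Int Int) (u : Int) : Prop :=
  q.Nodup ∧
  (∀ x : Int, x ∈ rc.keys ↔ x ∈ q) ∧
  (∀ x ∈ q, rc.getD x 0 < n) ∧
  (q ≠ [] → 0 ≤ u ∧ ∃ l, PySem.List.index? q l = some u.toNat ∧
      ∀ x ∈ q, x ≠ l → rc.getD x 0 < rc.getD l 0)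

theorem loop_agree (k : Int) (hk : 1 ≤ k) :
    ∀ (rest : List Int) (n : Int) (q : List Int) (rc : PySem.Dict Int Int)
      (f u : Int), MruInv n q rc u →
    (fun s => (s.1, s.2.2))
        ((PySem.List.enumerate rest n).foldl (mruStepA k) (q, rc, f)) =
      mruGoB k rest q u f := by
  intro rest
  induction rest with
  | nil => intro n q rc f u _; rfl
  | cons pagina rest ih =>
    intro n q rc f u hinv
    obtain ⟨hnd, hkeys, hbound, hlast⟩ := hinv
    rw [PySem.List.enumerate_cons, List.foldl_cons]
    by_cases hmem : pagina ∈ q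
    · -- hit
      obtain ⟨i0, hi0⟩ : ∃ i0, PySem.List.index? q pagina = some i0 :=
        Option.isSome_iff_exists.1 ((PySem.List.index?_isSome_iff q pagina).2 hmem)
      have hA : mruStepA k (q, rc, f) (n, pagina) = (q, rc.insert pagina n, f) := by
        simp [mruStepA, hmem]
      have hB : mruGoB k (pagina :: rest) q u f = mruGoB k rest q (i0 : Int) f := by
        rw [mruGoB, hi0]
      rw [hA, hB]
      refine ih (n + 1) q (rc.insert pagina n) f (i0 : Int) ⟨hnd, ?_, ?_, ?_⟩
      · intro x
        rw [PySem.Dict.mem_keys_insert, hkeys x]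
        constructor
        · rintro (rfl | h); exact hmem; exact h
        · exact Or.inr
      · intro x hx
        rw [PySem.Dict.getD_insert]
        split_ifs with h
        · omega
        · exact lt_trans (hbound x hx) (by omega)
      · intro _
        refine ⟨by positivity, pagina, by simpa using hi0, fun x hx hne => ?_⟩
        rw [PySem.Dict.getD_insert, if_neg hne, PySem.Dict.getD_insert, if_pos rfl]
        exact hbound x hx
    · -- miss
      have hidx : PySem.List.index? q pagina = none :=
        (PySem.List.index?_eq_none_iff q pagina).2 hmem
      by_cases hlen : (q.length : Int) < k
      · -- free frame: append
        have hA : mruStepA k (q, rc, f) (n, pagina) =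
            (q ++ [pagina], rc.insert pagina n, f + 1) := by
          simp [mruStepA, hmem, hlen]
        have hB : mruGoB k (pagina :: rest) q u f =
            mruGoB k rest (q ++ [pagina]) (q.length : Int) (f + 1) := by
          rw [mruGoB, hidx]; simp [hlen]
        rw [hA, hB]
        refine ih (n + 1) (q ++ [pagina]) (rc.insert pagina n) (f + 1)
          (q.length : Int) ⟨?_, ?_, ?_, ?_⟩
        · rw [List.nodup_append]
          refine ⟨hnd, List.nodup_singleton _, fun a ha b hb h => ?_⟩
          rw [List.mem_singleton] at hb
          subst hb; subst h
          exact hmem ha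
        · intro x
          simp only [PySem.Dict.mem_keys_insert, hkeys x, List.mem_append,
            List.mem_singleton]
          tauto
        · intro x hx
          rw [PySem.Dict.getD_insert]
          rcases List.mem_append.1 hx with hq | hp
          · have hxp : x ≠ pagina := fun h => hmem (h ▸ hq)
            rw [if_neg hxp]
            exact lt_trans (hbound x hq) (by omega)
          · simp only [List.mem_singleton] at hp
            rw [if_pos hp]; omega
        · intro _
          refine ⟨by positivity, pagina, ?_, fun x hx hne => ?_⟩
          · rw [Int.toNat_natCast]
            exact PySem.List.index?_append_singleton_self q pagina hmem
          · rw [PySem.Dict.getD_insert, if_neg hne, PySem.Dict.getD_insert, if_pos rfl]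
            rcases List.mem_append.1 hx with hq | hp
            · exact hbound x hq
            · simp only [List.mem_singleton] at hp; exact absurd hp hne
      · -- eviction
        have hq1 : 1 ≤ (q.length : Int) := le_trans hk (not_lt.1 hlen)
        have hqne : q ≠ [] := by
          intro h; subst h; simp at hq1
        obtain ⟨hu0, l0, hi0, hl0max⟩ := hlast hqne
        have hl0mem : l0 ∈ q := (PySem.List.index?_isSome_iff q l0).1 (by rw [hi0]; rfl)
        have hmax : PySem.List.max? rc.keys (fun x => rc.getD x 0) = some l0 :=
          max?_eq_of_strict _ _ l0 ((hkeys l0).2 hl0mem)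
            (fun y hy hne => hl0max y ((hkeys y).1 hy) hne)
        have hpne : pagina ≠ l0 := fun h => hmem (h ▸ hl0mem)
        have hi0' : List.idxOf? l0 q = some u.toNat := hi0
        have hA : mruStepA k (q, rc, f) (n, pagina) =
            (q.set u.toNat pagina, (rc.erase l0).insert pagina n, f + 1) := by
          simp [mruStepA, hmem, hlen, hmax, hi0']
        have hB : mruGoB k (pagina :: rest) q u f =
            mruGoB k rest (q.set u.toNat pagina) u (f + 1) := by
          rw [mruGoB, hidx]
          simp [hlen, if_neg (not_lt.2 hu0)]
        rw [hA, hB]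
        refine ih (n + 1) (q.set u.toNat pagina) ((rc.erase l0).insert pagina n)
          (f + 1) u ⟨List.Nodup.set hnd hmem, ?_, ?_, ?_⟩
        · intro x
          rw [PySem.Dict.mem_keys_insert, dict_mem_keys_erase,
            mem_set_fresh q u.toNat l0 pagina x hnd hi0 hmem, hkeys x]
        · intro x hx
          rw [PySem.Dict.getD_insert]
          rcases (mem_set_fresh q u.toNat l0 pagina x hnd hi0 hmem).1 hx with rfl | ⟨hq, hne⟩
          · rw [if_pos rfl]; omega
          · have hxp : x ≠ pagina := fun h => hmem (h ▸ hq)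
            rw [if_neg hxp, dict_getD_erase, if_neg hne]
            exact lt_trans (hbound x hq) (by omega)
        · intro _
          refine ⟨hu0, pagina, ?_, fun x hx hne => ?_⟩
          · rw [index?_set q u.toNat l0 pagina pagina hnd hi0 hmem, if_pos rfl]
          · rw [PySem.Dict.getD_insert, if_neg hne, PySem.Dict.getD_insert, if_pos rfl]
            rcases (mem_set_fresh q u.toNat l0 pagina x hnd hi0 hmem).1 hx with rfl | ⟨hq, hnl⟩
            · exact absurd rfl hne
            · rw [dict_getD_erase, if_neg hnl]
              exact hbound x hq

-- ===== VERDICT (by name: the statement is the Claim_ definition above) =====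
theorem mru_spec : Claim_equal_mru := by
  intro paginas k _hdom hpre
  unfold Spec_mru
  rcases hpre with hnil | hk
  · subst hnil; rfl
  · have h0 : MruInv 0 [] PySem.Dict.empty (-1) := by
      refine ⟨List.nodup_nil, ?_, ?_, ?_⟩
      · intro x; simp [PySem.Dict.keys_empty]
      · intro x hx; cases hx
      · intro h; exact absurd rfl h
    exact loop_agree k hk paginas 0 [] PySem.Dict.empty 0 (-1) h0
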